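-- pv_equiv track=rewrite | github.com/DmitryVlaznev/leetcode | 2355-maximum-number-of-books-you-can-take.py | maximumBooks2
-- ===== SOURCE A (Python) =====
-- from typing import List
--
-- def maximumBooks2(books: List[int]) -> int:
--     dp = [0] * len(books)
--     dp[0] = books[0]
--     res = books[0]
--
--     for end in range(1, len(books) - 1):
--         dp[end] = books[end]
--         m = books[end] - 1
--         i = end - 1
--         while dp[i] > m and i >= 0 and m > 0:
--             dp[end] += m
--             i, m = i - 1, m - 1
--
--         if dp[i] <= m and i >= 0 and m > 0:
--             dp[end] += dp[i]
--
--         res = max(res, dp[end])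
--     return res
-- ===== SOURCE B (Python) =====
-- def maximumBooks2(books):
--     n = len(books)
--     res = books[0]
--     dp = [0] * n
--     dp[0] = books[0]
--     # monotonic stack: idx strictly increasing, vals[p] = dp[idx[p]] - idx[p] strictly increasing
--     idx = [0]
--     vals = [books[0]]
--     for end in range(1, n - 1):
--         b = books[end]
--         k = b - end
--         # rightmost stack position whose val <= k (vals is sorted ascending): hand-rolled bisect_right
--         lo, hi = 0, len(vals)
--         while lo < hi:
--             mid = (lo + hi) // 2
--             if vals[mid] <= k:
--                 lo = mid + 1
--             else:
--                 hi = mid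
--         cut = end - b
--         if lo > 0 and idx[lo - 1] > cut:
--             i1 = idx[lo - 1]
--             t = end - 1 - i1
--             v = b + t * b - t * (t + 1) // 2 + dp[i1]
--         else:
--             stop = min(end - 1, max(cut, -1))
--             t = end - 1 - stop
--             v = b + t * b - t * (t + 1) // 2
--         dp[end] = v
--         myval = v - end
--         while vals and vals[-1] >= myval:
--             vals.pop()
--             idx.pop()
--         vals.append(myval)
--         idx.append(end)
--         if v > res:
--             res = v
--     return res
-- ===== Notes on version B (the rewrite author's own statement) =====
-- stated objective: alternative
-- what changed: A's per-end backward walk over dp is replaced by a monotonic stack of indices keyed by dp[i]-i, queried with a hand-rolled binary search, plus a closed-form arithmetic-series sum; asymptotically O(n log n) vs A's quadratic worst case, though A has the smaller constant on inputs whose inner walk is short.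
import Mathlib
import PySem

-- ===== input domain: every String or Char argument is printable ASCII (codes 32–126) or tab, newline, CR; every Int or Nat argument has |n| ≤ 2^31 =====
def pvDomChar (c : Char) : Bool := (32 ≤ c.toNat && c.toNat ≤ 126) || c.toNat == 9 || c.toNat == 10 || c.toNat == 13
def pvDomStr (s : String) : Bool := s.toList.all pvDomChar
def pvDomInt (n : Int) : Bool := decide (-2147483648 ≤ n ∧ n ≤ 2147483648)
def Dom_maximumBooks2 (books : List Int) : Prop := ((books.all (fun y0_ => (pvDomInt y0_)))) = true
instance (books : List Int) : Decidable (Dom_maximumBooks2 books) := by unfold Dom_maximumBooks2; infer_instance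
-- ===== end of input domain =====

-- B replaces A's per-end backward walk over dp by a monotonic stack of (index, dp[i]-i)
-- queried with binary search plus a closed-form arithmetic-series sum (objective: alternative
-- algorithm; the backward scan disappears).

-- ===== PORT A =====
-- A's inner while loop: `while dp[i] > m and i >= 0 and m > 0: dp[end] += m; i, m = i - 1, m - 1`.
-- The running value of dp[end] is threaded as `acc` (the loop never reads index end: all its
-- reads are at i < end or at -1, which wraps to len-1 > end); the single write happens after.
-- Index i always satisfies -1 ≤ i < len dp here, so pyGetD's default is never used (no IndexError).
def pvInnerA (dp : List Int) (i m acc : Int) : Int × Int × Int :=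
  if _h : PySem.List.pyGetD dp i 0 > m ∧ i ≥ 0 ∧ m > 0 then
    pvInnerA dp (i - 1) (m - 1) (acc + m)
  else
    (i, m, acc)
termination_by (i + 1).toNat
decreasing_by omega

-- one iteration of A's outer `for end in range(1, len(books) - 1)` loop; state = (dp, res)
def pvStepA (books : List Int) (st : List Int × Int) (endI : Int) : List Int × Int :=
  let dp := st.1
  let b := PySem.List.pyGetD books endI 0          -- books[end]; 1 ≤ end ≤ len-2, in range
  let r := pvInnerA dp (endI - 1) (b - 1) b        -- dp[end] = books[end]; m = b-1; i = end-1; while …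
  let i := r.1
  let m := r.2.1
  let acc := if PySem.List.pyGetD dp i 0 ≤ m ∧ i ≥ 0 ∧ m > 0 then r.2.2 + PySem.List.pyGetD dp i 0 else r.2.2
  (PySem.List.pySetD dp endI acc, max st.2 acc)    -- dp[end] written; res = max(res, dp[end])

def maximumBooks2 (books : List Int) : Int :=
  match PySem.List.pyGet? books 0 with
  | none => 0                                      -- books[0] raises IndexError; excluded by Pre_
  | some b0 =>
    let dp := PySem.List.pySetD (List.replicate books.length 0) 0 b0   -- dp = [0]*n; dp[0] = books[0]
    ((PySem.List.pyRange 1 ((books.length : Int) - 1) 1).foldl (pvStepA books) (dp, b0)).2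

-- ===== PORT B =====
-- B's hand-rolled bisect_right: `while lo < hi: mid = (lo+hi)//2; …`
def pvBisect (vals : List Int) (k lo hi : Int) : Int :=
  if h : lo < hi then
    let mid := PySem.Int.floordiv (lo + hi) 2
    if PySem.List.pyGetD vals mid 0 ≤ k then pvBisect vals k (mid + 1) hi
    else pvBisect vals k lo mid
  else lo
termination_by (hi - lo).toNat
decreasing_by
  · have h1 := PySem.Int.floordiv_two_mid_bounds (le_of_lt h)
    omega
  · have h1 := PySem.Int.floordiv_two_mid_bounds (le_of_lt h)
    have h2 : PySem.Int.floordiv (lo + hi) 2 < hi := by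
      rw [PySem.Int.floordiv_lt_iff_lt_mul (by norm_num)]; omega
    omega

-- B's pop loop: `while vals and vals[-1] >= myval: vals.pop(); idx.pop()`
def pvPopGE (idx vals : List Int) (m : Int) : List Int × List Int :=
  match vals with
  | [] => (idx, [])
  | v :: vs =>
    if m ≤ (v :: vs).getLast (List.cons_ne_nil v vs) then
      pvPopGE idx.dropLast (v :: vs).dropLast m
    else (idx, v :: vs)
termination_by vals.length
decreasing_by simp [List.length_dropLast]

-- one iteration of B's outer loop; state = ((dp, idx, vals), res)
def pvStepB (books : List Int) (st : (List Int × List Int × List Int) × Int) (endI : Int) :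
    (List Int × List Int × List Int) × Int :=
  let dp := st.1.1
  let idx := st.1.2.1
  let vals := st.1.2.2
  let b := PySem.List.pyGetD books endI 0
  let k := b - endI
  let lo := pvBisect vals k 0 (vals.length : Int)
  let cut := endI - b
  let v :=
    if lo > 0 ∧ PySem.List.pyGetD idx (lo - 1) 0 > cut then
      let i1 := PySem.List.pyGetD idx (lo - 1) 0
      let t := endI - 1 - i1
      b + t * b - PySem.Int.floordiv (t * (t + 1)) 2 + PySem.List.pyGetD dp i1 0
    else
      let stop := min (endI - 1) (max cut (-1))
      let t := endI - 1 - stop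
      b + t * b - PySem.Int.floordiv (t * (t + 1)) 2
  let dp' := PySem.List.pySetD dp endI v
  let pr := pvPopGE idx vals (v - endI)
  ((dp', pr.1 ++ [endI], pr.2 ++ [v - endI]), if v > st.2 then v else st.2)

def maximumBooks2_alt (books : List Int) : Int :=
  match PySem.List.pyGet? books 0 with
  | none => 0                                      -- books[0] raises IndexError; excluded by Pre_
  | some b0 =>
    let dp := PySem.List.pySetD (List.replicate books.length 0) 0 b0
    ((PySem.List.pyRange 1 ((books.length : Int) - 1) 1).foldl (pvStepB books) ((dp, [0], [b0]), b0)).2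

-- ===== PRECONDITION & SPEC =====
-- A evaluates books[0], which raises IndexError exactly on the empty list.
def Pre_maximumBooks2 (books : List Int) : Prop := books ≠ []
instance (books : List Int) : Decidable (Pre_maximumBooks2 books) := by
  unfold Pre_maximumBooks2; infer_instance

def pvWitness_maximumBooks2 : List Int := [1, 5, 2, 4]

def Spec_maximumBooks2 (books : List Int) (out : Int) : Prop := out = maximumBooks2_alt books
instance (books : List Int) (out : Int) : Decidable (Spec_maximumBooks2 books out) := by unfold Spec_maximumBooks2; infer_instance

-- ===== CLAIM (what is proved, stated in full; the proofs are below) =====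
def Claim_equal_maximumBooks2 : Prop := ∀ (books : List Int), Dom_maximumBooks2 books → Pre_maximumBooks2 books → Spec_maximumBooks2 books (maximumBooks2 books)

-- ===== LEMMAS AND PROOFS =====

-- the stack invariant B maintains before processing index e: parallel lists idx/vals with
-- vals[p] = dp[idx[p]] - idx[p], indices in [0, e), both strictly increasing along the stack,
-- and every index not on the stack dominated by a larger stack index with a ≤ value.
def pvInv (e : Int) (dp idx vals : List Int) : Prop :=
  idx.length = vals.length ∧
  (∀ p : Nat, p < idx.length → 0 ≤ idx.getD p 0 ∧ idx.getD p 0 < e) ∧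
  (∀ p q : Nat, p < q → q < idx.length → idx.getD p 0 < idx.getD q 0 ∧ vals.getD p 0 < vals.getD q 0) ∧
  (∀ p : Nat, p < idx.length → vals.getD p 0 = PySem.List.pyGetD dp (idx.getD p 0) 0 - idx.getD p 0) ∧
  (∀ i : Int, 0 ≤ i → i < e → (∀ p : Nat, p < idx.length → idx.getD p 0 ≠ i) →
    ∃ p : Nat, p < idx.length ∧ i < idx.getD p 0 ∧ vals.getD p 0 ≤ PySem.List.pyGetD dp i 0 - i)

-- Int-indexed read bridged to Nat getD
theorem pvGetD_int (xs : List Int) (i : Int) (h0 : 0 ≤ i) (h1 : i < (xs.length : Int)) :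
    PySem.List.pyGetD xs i 0 = xs.getD i.toNat 0 := by
  rw [PySem.List.pyGetD_eq_getElem xs 0 h0 h1, List.getD_eq_getElem xs 0 (n := i.toNat) (by omega)]

theorem pvGetD_take (xs : List Int) (s p : Nat) (hp : p < s) (hpl : p < xs.length) :
    (xs.take s).getD p 0 = xs.getD p 0 := by
  rw [List.getD_eq_getElem _ _ (by simp; omega), List.getD_eq_getElem _ _ hpl]
  exact List.getElem_take ..

theorem pvGetD_append_lt (xs ys : List Int) (p : Nat) (hp : p < xs.length) :
    (xs ++ ys).getD p 0 = xs.getD p 0 := by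
  rw [List.getD_eq_getElem _ _ (by simp; omega), List.getD_eq_getElem _ _ hp]
  exact List.getElem_append_left ..

theorem pvGetD_append_len (xs : List Int) (y : Int) (s : Nat) (hs : xs.length = s) :
    (xs ++ [y]).getD s 0 = y := by
  subst hs
  rw [List.getD_eq_getElem _ _ (by simp)]
  simp

-- the sum A's while loop accumulates: m + (m-1) + ... + (m-d+1)
def pvSumDown : Nat → Int → Int
  | 0, _ => 0
  | d + 1, m => m + pvSumDown d (m - 1)

theorem pvSumDown_closed (d : Nat) : ∀ m : Int, 2 * pvSumDown d m = d * (2 * m - d + 1) := by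
  induction d with
  | zero => intro m; simp [pvSumDown]
  | succ d ih =>
    intro m
    have h := ih (m - 1)
    simp only [pvSumDown]
    push_cast
    push_cast at h
    linear_combination h

-- the closed-form series Source B computes equals the accumulated sum
theorem pvSeries_eq (t : Int) (ht : 0 ≤ t) (b : Int) :
    t * b - PySem.Int.floordiv (t * (t + 1)) 2 = pvSumDown t.toNat (b - 1) := by
  have hts : (t.toNat : Int) = t := by omega
  have hs := pvSumDown_closed t.toNat (b - 1)
  rw [hts] at hs
  have hdiv : PySem.Int.floordiv (t * (t + 1)) 2 = t * (t + 1) / 2 :=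
    PySem.Int.floordiv_eq_ediv_of_pos (by norm_num)
  have h2 : t * (t + 1) = 2 * (t * b - pvSumDown t.toNat (b - 1)) := by linarith [hs]
  rw [hdiv, h2, Int.mul_ediv_cancel_left _ (by norm_num)]
  ring

-- the continuation condition of A's inner while loop
def pvCond (dp : List Int) (b e i : Int) : Prop :=
  PySem.List.pyGetD dp i 0 > b - (e - i) ∧ i ≥ 0 ∧ b - (e - i) > 0

-- A's inner loop stops exactly at the first i (descending) violating pvCond
theorem pvInnerA_stop (dp : List Int) (b e : Int) :
    ∀ (fuel : Nat) (start i0 : Int), (start - i0).toNat ≤ fuel → i0 ≤ start →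
    ¬ pvCond dp b e i0 → (∀ i : Int, i0 < i → i ≤ start → pvCond dp b e i) →
    ∀ acc : Int, pvInnerA dp start (b - (e - start)) acc =
      (i0, b - (e - i0), acc + pvSumDown (start - i0).toNat (b - (e - start))) := by
  intro fuel
  induction fuel with
  | zero =>
    intro start i0 hf hle hstop _ acc
    have : start = i0 := by omega
    subst this
    rw [pvInnerA]
    rw [dif_neg (by unfold pvCond at hstop; tauto)]
    simp [pvSumDown]
  | succ n ih =>
    intro start i0 hf hle hstop hall acc
    by_cases heq : start = i0
    · subst heq
      rw [pvInnerA, dif_neg (by unfold pvCond at hstop; tauto)]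
      simp [pvSumDown]
    · have hc : pvCond dp b e start := hall start (by omega) le_rfl
      rw [pvInnerA, dif_pos (by unfold pvCond at hc; exact ⟨hc.1, hc.2.1, hc.2.2⟩)]
      have h1 : b - (e - start) - 1 = b - (e - (start - 1)) := by ring
      rw [h1, ih (start - 1) i0 (by omega) (by omega) hstop
        (fun i hi1 hi2 => hall i hi1 (by omega)) (acc + (b - (e - start)))]
      have ht : (start - i0).toNat = (start - 1 - i0).toNat + 1 := by omega
      rw [ht]
      simp only [pvSumDown]
      refine Prod.ext rfl (Prod.ext rfl ?_)
      simp only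
      ring_nf

-- bisect_right on a sorted list: positions below the result hold values ≤ k,
-- positions at or above it hold values > k
theorem pvBisect_spec (vals : List Int) (k : Int)
    (mono : ∀ p q : Nat, p ≤ q → q < vals.length → vals.getD p 0 ≤ vals.getD q 0) :
    ∀ (fuel : Nat) (lo hi : Int), (hi - lo).toNat ≤ fuel → 0 ≤ lo → lo ≤ hi →
    hi ≤ (vals.length : Int) →
    (∀ p : Nat, (p : Int) < lo → vals.getD p 0 ≤ k) →
    (∀ p : Nat, hi ≤ (p : Int) → p < vals.length → k < vals.getD p 0) →
    lo ≤ pvBisect vals k lo hi ∧ pvBisect vals k lo hi ≤ hi ∧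
    (∀ p : Nat, (p : Int) < pvBisect vals k lo hi → vals.getD p 0 ≤ k) ∧
    (∀ p : Nat, pvBisect vals k lo hi ≤ (p : Int) → p < vals.length → k < vals.getD p 0) := by
  intro fuel
  induction fuel with
  | zero =>
    intro lo hi hf h0 hlh hhl hlow hhigh
    have : ¬ lo < hi := by omega
    rw [pvBisect, dif_neg this]
    exact ⟨le_rfl, hlh, hlow, fun p hp hpl => hhigh p (by omega) hpl⟩
  | succ n ih =>
    intro lo hi hf h0 hlh hhl hlow hhigh
    by_cases h : lo < hi
    · rw [pvBisect, dif_pos h]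
      have hmb := PySem.Int.floordiv_two_mid_bounds (le_of_lt h)
      have hmlt : PySem.Int.floordiv (lo + hi) 2 < hi := by
        rw [PySem.Int.floordiv_lt_iff_lt_mul (by norm_num)]; omega
      set mid := PySem.Int.floordiv (lo + hi) 2 with hmid
      have hmg : PySem.List.pyGetD vals mid 0 = vals.getD mid.toNat 0 :=
        pvGetD_int vals mid (by omega) (by omega)
      by_cases hc : PySem.List.pyGetD vals mid 0 ≤ k
      · rw [if_pos hc]
        refine (ih (mid + 1) hi (by omega) (by omega) (by omega) hhl ?_ hhigh).imp
          (fun a => by omega) (fun a => a)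
        intro p hp
        by_cases hpl : (p : Int) < lo
        · exact hlow p hpl
        · have : vals.getD p 0 ≤ vals.getD mid.toNat 0 := mono p mid.toNat (by omega) (by omega)
          omega
      · rw [if_neg hc]
        refine (ih lo mid (by omega) h0 (by omega) (by omega) hlow ?_).imp
          (fun a => a) (fun a => ⟨by omega, a.2⟩)
        intro p hp hpl
        by_cases hph : hi ≤ (p : Int)
        · exact hhigh p hph hpl
        · have : vals.getD mid.toNat 0 ≤ vals.getD p 0 := mono mid.toNat p (by omega) (by omega)
          omega
    · rw [pvBisect, dif_neg h]
      exact ⟨le_rfl, hlh, hlow, fun p hp hpl => hhigh p (by omega) hpl⟩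

-- the pop loop removes exactly a suffix, every removed value ≥ m, the new top < m
theorem pvPopGE_spec : ∀ (fuel : Nat) (vals idx : List Int) (m : Int), vals.length ≤ fuel →
    idx.length = vals.length →
    ∃ s : Nat, s ≤ vals.length ∧ pvPopGE idx vals m = (idx.take s, vals.take s) ∧
      (∀ p : Nat, s ≤ p → p < vals.length → m ≤ vals.getD p 0) ∧
      (0 < s → vals.getD (s - 1) 0 < m) := by
  intro fuel
  induction fuel with
  | zero =>
    intro vals idx m hf hl
    have hv : vals = [] := by cases vals <;> simp_all
    subst hv
    have hi : idx = [] := by cases idx <;> simp_all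
    subst hi
    exact ⟨0, by simp [pvPopGE]⟩
  | succ n ih =>
    intro vals idx m hf hl
    match vals with
    | [] =>
      have hi : idx = [] := by cases idx <;> simp_all
      subst hi
      exact ⟨0, by simp [pvPopGE]⟩
    | v :: vs =>
      set w := v :: vs with hw
      have hlen : 0 < w.length := by simp [hw]
      have hlast : w.getD (w.length - 1) 0 = w.getLast (by simp [hw]) := by
        rw [List.getD_eq_getElem w 0 (by omega), List.getLast_eq_getElem]
      rw [pvPopGE]
      by_cases hc : m ≤ w.getLast (by simp [hw])
      · rw [if_pos hc]
        have hdl : w.dropLast.length = w.length - 1 := List.length_dropLast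
        have hdi : idx.dropLast.length = idx.length - 1 := List.length_dropLast
        obtain ⟨s, hs1, hs2, hs3, hs4⟩ := ih w.dropLast idx.dropLast m (by omega) (by omega)
        refine ⟨s, by omega, ?_, ?_, ?_⟩
        · rw [hs2]
          have t1 : idx.dropLast.take s = idx.take s := by
            rw [List.dropLast_eq_take, List.take_take]
            congr 1; omega
          have t2 : w.dropLast.take s = w.take s := by
            rw [List.dropLast_eq_take, List.take_take]
            congr 1; omega
          rw [t1, t2]
        · intro p hp hpl
          by_cases hpe : p = w.length - 1
          · subst hpe; omega
          · have heq : w.dropLast.getD p 0 = w.getD p 0 := by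
              rw [List.getD_eq_getElem _ _ (by omega), List.getD_eq_getElem _ _ (by omega)]
              exact List.getElem_dropLast ..
            have := hs3 p hp (by omega)
            omega
        · intro hs
          have hsl : s - 1 < w.dropLast.length := by omega
          have heq : w.dropLast.getD (s-1) 0 = w.getD (s-1) 0 := by
            rw [List.getD_eq_getElem _ _ hsl, List.getD_eq_getElem _ _ (by omega)]
            exact List.getElem_dropLast ..
          have := hs4 hs
          omega
      · rw [if_neg hc]
        refine ⟨w.length, le_rfl, ?_, by omega, by intro _; omega⟩
        rw [List.take_length, ← hl, List.take_length]

-- the two computed dp[end] values coincide under the invariant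
theorem pvValue_eq (dp idx vals : List Int) (e b : Int) (he : 1 ≤ e)
    (hInv : pvInv e dp idx vals) :
    (if PySem.List.pyGetD dp (pvInnerA dp (e - 1) (b - 1) b).1 0 ≤ (pvInnerA dp (e - 1) (b - 1) b).2.1 ∧
        (pvInnerA dp (e - 1) (b - 1) b).1 ≥ 0 ∧ (pvInnerA dp (e - 1) (b - 1) b).2.1 > 0 then
       (pvInnerA dp (e - 1) (b - 1) b).2.2 + PySem.List.pyGetD dp (pvInnerA dp (e - 1) (b - 1) b).1 0
     else (pvInnerA dp (e - 1) (b - 1) b).2.2) =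
    (if pvBisect vals (b - e) 0 (vals.length : Int) > 0 ∧
        PySem.List.pyGetD idx (pvBisect vals (b - e) 0 (vals.length : Int) - 1) 0 > e - b then
       b + (e - 1 - PySem.List.pyGetD idx (pvBisect vals (b - e) 0 (vals.length : Int) - 1) 0) * b -
         PySem.Int.floordiv ((e - 1 - PySem.List.pyGetD idx (pvBisect vals (b - e) 0 (vals.length : Int) - 1) 0) *
           ((e - 1 - PySem.List.pyGetD idx (pvBisect vals (b - e) 0 (vals.length : Int) - 1) 0) + 1)) 2 +
         PySem.List.pyGetD dp (PySem.List.pyGetD idx (pvBisect vals (b - e) 0 (vals.length : Int) - 1) 0) 0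
     else
       b + (e - 1 - min (e - 1) (max (e - b) (-1))) * b -
         PySem.Int.floordiv ((e - 1 - min (e - 1) (max (e - b) (-1))) *
           ((e - 1 - min (e - 1) (max (e - b) (-1))) + 1)) 2) := by
  obtain ⟨hL, hB, hS, hC, hD⟩ := hInv
  have mono : ∀ p q : Nat, p ≤ q → q < vals.length → vals.getD p 0 ≤ vals.getD q 0 := by
    intro p q hpq hq
    rcases Nat.eq_or_lt_of_le hpq with h | h
    · rw [h]
    · exact le_of_lt (hS p q h (by omega)).2
  obtain ⟨hr0, hrL, hrlow, hrhigh⟩ := pvBisect_spec vals (b - e) mono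
    vals.length 0 (vals.length : Int) (by omega) le_rfl (by omega) (by omega)
    (by intro p hp; exfalso; omega) (by intro p h1 h2; exfalso; omega)
  set r := pvBisect vals (b - e) 0 (vals.length : Int) with hr
  have key : ∀ i : Int, 0 ≤ i → i < e →
      (∀ p : Nat, p < idx.length → (p : Int) < r → idx.getD p 0 < i) →
      b - e < PySem.List.pyGetD dp i 0 - i := by
    intro i h0 h1 hlt
    by_cases hmem : ∃ p : Nat, p < idx.length ∧ idx.getD p 0 = i
    · obtain ⟨p, hpl, hpe⟩ := hmem
      have hpr : r ≤ (p : Int) := by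
        by_contra hcon
        have := hlt p hpl (by omega)
        omega
      have := hrhigh p hpr (by omega)
      have := hC p hpl
      rw [hpe] at this
      omega
    · push_neg at hmem
      obtain ⟨q, hql, hqi, hqv⟩ := hD i h0 h1 hmem
      have hqr : r ≤ (q : Int) := by
        by_contra hcon
        have := hlt q hql (by omega)
        omega
      have := hrhigh q hqr (by omega)
      omega
  have hb1 : b - 1 = b - (e - (e - 1)) := by ring
  by_cases hbr : r > 0 ∧ PySem.List.pyGetD idx (r - 1) 0 > e - b
  · -- the stack answer gives A's stop index, dp[i1] is added on both sides
    obtain ⟨hrpos, hcut⟩ := hbr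
    have hpi : PySem.List.pyGetD idx (r - 1) 0 = idx.getD (r - 1).toNat 0 :=
      pvGetD_int idx (r - 1) (by omega) (by omega)
    rw [hpi] at hcut
    have hb1b := hB (r - 1).toNat (by omega)
    have hv1 : vals.getD (r - 1).toNat 0 ≤ b - e := hrlow (r - 1).toNat (by omega)
    have hc1 := hC (r - 1).toNat (by omega)
    have hnc : ¬ pvCond dp b e (idx.getD (r - 1).toNat 0) := by
      unfold pvCond
      intro ⟨h1, _, _⟩
      omega
    have hall : ∀ i : Int, idx.getD (r - 1).toNat 0 < i → i ≤ e - 1 → pvCond dp b e i := by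
      intro i hi1lt hile
      have hk := key i (by omega) (by omega) ?_
      · exact ⟨by omega, by omega, by omega⟩
      · intro p hpl hpr
        calc idx.getD p 0 ≤ idx.getD (r - 1).toNat 0 := by
              rcases Nat.lt_or_ge p (r - 1).toNat with h | h
              · exact le_of_lt (hS p (r - 1).toNat h (by omega)).1
              · have : p = (r - 1).toNat := by omega
                rw [this]
          _ < i := hi1lt
    rw [hb1, pvInnerA_stop dp b e (e - 1 - idx.getD (r - 1).toNat 0).toNat (e - 1)
      (idx.getD (r - 1).toNat 0) le_rfl (by omega) hnc hall b]
    rw [if_pos ?side]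
    case side =>
      refine ⟨by simp only; omega, by simp only; omega, by simp only; omega⟩
    rw [if_pos ⟨hrpos, by rw [hpi]; exact hcut⟩]
    simp only
    rw [hpi]
    have hser := pvSeries_eq (e - 1 - idx.getD (r - 1).toNat 0) (by omega) b
    rw [← hb1, ← hser]
    ring
  · -- no admissible stack answer: A stops on m ≤ 0 or i < 0, nothing is added
    set stp := min (e - 1) (max (e - b) (-1)) with hstp
    have hnc : ¬ pvCond dp b e stp := by
      unfold pvCond
      intro ⟨h1, h2, h3⟩
      omega
    have hall : ∀ i : Int, stp < i → i ≤ e - 1 → pvCond dp b e i := by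
      intro i hstlt hile
      have hige : 0 ≤ i := by omega
      have hicut : e - b < i := by omega
      have hk := key i hige (by omega) ?_
      · exact ⟨by omega, by omega, by omega⟩
      · intro p hpl hpr
        have hrpos : (0 : Int) < r := by omega
        have hncut : ¬ PySem.List.pyGetD idx (r - 1) 0 > e - b := by tauto
        have hpi : PySem.List.pyGetD idx (r - 1) 0 = idx.getD (r - 1).toNat 0 :=
          pvGetD_int idx (r - 1) (by omega) (by omega)
        rw [hpi] at hncut
        calc idx.getD p 0 ≤ idx.getD (r - 1).toNat 0 := by
              rcases Nat.lt_or_ge p (r - 1).toNat with h | h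
              · exact le_of_lt (hS p (r - 1).toNat h (by omega)).1
              · have : p = (r - 1).toNat := by omega
                rw [this]
          _ ≤ e - b := by omega
          _ < i := hicut
    rw [hb1, pvInnerA_stop dp b e (e - 1 - stp).toNat (e - 1) stp le_rfl (by omega) hnc hall b]
    rw [if_neg ?side]
    case side =>
      intro ⟨h1, h2, h3⟩
      simp only at h1 h2 h3
      omega
    rw [if_neg hbr]
    simp only
    have hser := pvSeries_eq (e - 1 - stp) (by omega) b
    rw [← hb1, ← hser]
    ring

-- pushing the freshly computed dp[end] keeps the invariant
theorem pvInv_push (e : Int) (dp idx vals : List Int) (v : Int) (he : 0 ≤ e)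
    (hlen : e < (dp.length : Int)) (hInv : pvInv e dp idx vals) :
    pvInv (e + 1) (PySem.List.pySetD dp e v)
      ((pvPopGE idx vals (v - e)).1 ++ [e]) ((pvPopGE idx vals (v - e)).2 ++ [v - e]) := by
  obtain ⟨hL, hB, hS, hC, hD⟩ := hInv
  obtain ⟨s, hs1, hs2, hs3, hs4⟩ := pvPopGE_spec vals.length vals idx (v - e) le_rfl hL
  rw [hs2]
  simp only
  have hsl : (idx.take s).length = s := by rw [List.length_take]; omega
  have hvl : (vals.take s).length = s := by rw [List.length_take]; omega
  -- dp reads below e are unchanged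
  have hdp : ∀ i : Int, 0 ≤ i → i < e →
      PySem.List.pyGetD (PySem.List.pySetD dp e v) i 0 = PySem.List.pyGetD dp i 0 := by
    intro i h0 h1
    have h := PySem.List.pyGetD_pySetD_natCast dp e.toNat i.toNat v 0 (by omega)
    rw [if_neg (by omega)] at h
    rw [show ((e.toNat : Nat) : Int) = e from by omega,
        show ((i.toNat : Nat) : Int) = i from by omega] at h
    exact h
  have hdpe : PySem.List.pyGetD (PySem.List.pySetD dp e v) e 0 = v := by
    have h := PySem.List.pyGetD_pySetD_natCast dp e.toNat e.toNat v 0 (by omega)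
    rw [if_pos rfl] at h
    rw [show ((e.toNat : Nat) : Int) = e from by omega] at h
    exact h
  refine ⟨by simp [hsl, hvl], ?_, ?_, ?_, ?_⟩
  · -- bounds
    intro p hp
    rw [List.length_append, hsl] at hp
    simp at hp
    by_cases hps : p < s
    · rw [pvGetD_append_lt _ _ p (by omega), pvGetD_take _ _ _ hps (by omega)]
      have := hB p (by omega)
      omega
    · have hpe : p = s := by omega
      rw [hpe, pvGetD_append_len _ _ _ hsl]
      omega
  · -- strictly increasing
    intro p q hpq hq
    rw [List.length_append, hsl] at hq
    simp at hq
    by_cases hqs : q < s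
    · rw [pvGetD_append_lt _ _ p (by omega), pvGetD_take _ _ _ (by omega) (by omega),
          pvGetD_append_lt _ _ q (by omega), pvGetD_take _ _ _ hqs (by omega),
          pvGetD_append_lt (vals.take s) _ p (by omega), pvGetD_take _ _ _ (by omega) (by omega),
          pvGetD_append_lt (vals.take s) _ q (by omega), pvGetD_take _ _ _ hqs (by omega)]
      exact hS p q hpq (by omega)
    · have hqe : q = s := by omega
      rw [hqe, pvGetD_append_lt _ _ p (by omega), pvGetD_take _ _ _ (by omega) (by omega),
          pvGetD_append_lt (vals.take s) _ p (by omega), pvGetD_take _ _ _ (by omega) (by omega),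
          pvGetD_append_len _ _ _ hsl, pvGetD_append_len _ _ _ hvl]
      constructor
      · have := hB p (by omega)
        omega
      · -- vals[p] < v - e : p ≤ s-1, vals[p] ≤ vals[s-1] < v - e
        have h4 := hs4 (by omega)
        by_cases hps : p = s - 1
        · subst hps; omega
        · have := (hS p (s-1) (by omega) (by omega)).2
          omega
  · -- consistency
    intro p hp
    rw [List.length_append, hsl] at hp
    simp at hp
    by_cases hps : p < s
    · rw [pvGetD_append_lt (vals.take s) _ p (by omega), pvGetD_take vals _ _ hps (by omega),
          pvGetD_append_lt (idx.take s) _ p (by omega), pvGetD_take idx _ _ hps (by omega)]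
      have hb := hB p (by omega)
      rw [hdp _ hb.1 hb.2]
      exact hC p (by omega)
    · have hpe : p = s := by omega
      rw [hpe, pvGetD_append_len _ _ _ hsl, pvGetD_append_len _ _ _ hvl, hdpe]
  · -- domination
    intro i h0 h1 hni
    by_cases hie : i = e
    · exfalso
      exact hni s (by rw [List.length_append, hsl]; simp) (by rw [pvGetD_append_len _ _ _ hsl]; omega) |>.elim
    · -- i < e
      have h1' : i < e := by omega
      rw [hdp i h0 h1']
      -- is i on the old stack?
      by_cases hmem : ∃ p : Nat, p < idx.length ∧ idx.getD p 0 = i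
      · obtain ⟨p, hpl, hpe⟩ := hmem
        -- p must have been popped (p ≥ s), else contradiction with hni
        by_cases hps : p < s
        · exfalso
          apply hni p (by rw [List.length_append, hsl]; omega)
          rw [pvGetD_append_lt _ _ p (by omega), pvGetD_take _ _ _ hps (by omega)]
          omega
        · -- popped: vals[p] ≥ v - e, so dominated by the new top e
          have hge := hs3 p (by omega) (by omega)
          refine ⟨s, by rw [List.length_append, hsl]; simp, ?_, ?_⟩
          · rw [pvGetD_append_len _ _ _ hsl]; omega
          · rw [pvGetD_append_len _ _ _ hvl]
            have := hC p hpl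
            rw [hpe] at this
            omega
      · push_neg at hmem
        obtain ⟨p, hpl, hpi, hpv⟩ := hD i h0 h1' hmem
        by_cases hps : p < s
        · refine ⟨p, by rw [List.length_append, hsl]; omega, ?_, ?_⟩
          · rw [pvGetD_append_lt _ _ p (by omega), pvGetD_take _ _ _ hps (by omega)]; omega
          · rw [pvGetD_append_lt (vals.take s) _ p (by omega), pvGetD_take _ _ _ hps (by omega)]
            omega
        · have hge := hs3 p (by omega) (by omega)
          refine ⟨s, by rw [List.length_append, hsl]; simp, ?_, ?_⟩
          · rw [pvGetD_append_len _ _ _ hsl]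
            omega
          · rw [pvGetD_append_len _ _ _ hvl]
            omega

-- one step: same dp and res on both sides, invariant advanced
theorem pvStep_eq (books dp idx vals : List Int) (res e : Int) (he : 1 ≤ e)
    (hel : e < (books.length : Int) - 1) (hdl : dp.length = books.length)
    (hInv : pvInv e dp idx vals) :
    pvStepA books (dp, res) e =
      ((pvStepB books ((dp, idx, vals), res) e).1.1, (pvStepB books ((dp, idx, vals), res) e).2) ∧
    pvInv (e + 1) (pvStepB books ((dp, idx, vals), res) e).1.1
      (pvStepB books ((dp, idx, vals), res) e).1.2.1 (pvStepB books ((dp, idx, vals), res) e).1.2.2 ∧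
    (pvStepB books ((dp, idx, vals), res) e).1.1.length = books.length := by
  have hv := pvValue_eq dp idx vals e (PySem.List.pyGetD books e 0) he hInv
  refine ⟨?_, ?_, ?_⟩
  · simp only [pvStepA, pvStepB]
    rw [hv]
    refine Prod.ext rfl ?_
    simp only
    omega
  · simp only [pvStepB]
    exact pvInv_push e dp idx vals _ (by omega) (by omega) hInv
  · simp only [pvStepB, PySem.List.length_pySetD]
    exact hdl

theorem pvFold_eq (books : List Int) : ∀ (fuel : Nat) (e : Int) (dp idx vals : List Int) (res : Int),
    1 ≤ e → ((books.length : Int) - 1 - e).toNat ≤ fuel → dp.length = books.length →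
    pvInv e dp idx vals →
    ((PySem.List.pyRange e ((books.length : Int) - 1) 1).foldl (pvStepA books) (dp, res)).2 =
    ((PySem.List.pyRange e ((books.length : Int) - 1) 1).foldl (pvStepB books) ((dp, idx, vals), res)).2 := by
  intro fuel
  induction fuel with
  | zero =>
    intro e dp idx vals res he hf hdl hInv
    rw [PySem.List.pyRange_one_eq_nil (by omega)]
    rfl
  | succ n ih =>
    intro e dp idx vals res he hf hdl hInv
    by_cases hlt : e < (books.length : Int) - 1
    · rw [PySem.List.pyRange_one_cons hlt]
      simp only [List.foldl_cons]
      obtain ⟨h1, h2, h3⟩ := pvStep_eq books dp idx vals res e he hlt hdl hInv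
      rw [h1]
      exact ih (e + 1) (pvStepB books ((dp, idx, vals), res) e).1.1
        (pvStepB books ((dp, idx, vals), res) e).1.2.1
        (pvStepB books ((dp, idx, vals), res) e).1.2.2
        (pvStepB books ((dp, idx, vals), res) e).2 (by omega) (by omega) h3 h2
    · rw [PySem.List.pyRange_one_eq_nil (by omega)]
      rfl

-- ===== VERDICT (by name: the statement is the Claim_ definition above) =====
theorem maximumBooks2_spec : Claim_equal_maximumBooks2 := by
  intro books _ hpre
  unfold Spec_maximumBooks2 maximumBooks2 maximumBooks2_alt
  have hn : 0 < books.length := List.length_pos_of_ne_nil hpre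
  rcases hg : PySem.List.pyGet? books 0 with _ | b0
  · rfl
  · have hdp0 : (PySem.List.pySetD (List.replicate books.length 0) 0 b0).length = books.length := by
      rw [PySem.List.pySetD_of_nonneg _ _ le_rfl]
      simp
    have hget0 : PySem.List.pyGetD (PySem.List.pySetD (List.replicate books.length 0) 0 b0) 0 0 = b0 := by
      rw [PySem.List.pySetD_of_nonneg _ _ le_rfl, PySem.List.pyGetD_zero,
        List.getD_eq_getElem _ _ (by simp; omega)]
      simp [List.getElem_set_self]
    have hinv : pvInv 1 (PySem.List.pySetD (List.replicate books.length 0) 0 b0) [0] [b0] := by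
      refine ⟨rfl, ?_, ?_, ?_, ?_⟩
      · intro p hp
        have hp0 : p = 0 := by simpa using hp
        subst hp0
        simp
      · intro p q hpq hq
        simp at hq
        omega
      · intro p hp
        have hp0 : p = 0 := by simpa using hp
        subst hp0
        simpa using hget0.symm
      · intro i h0 h1 hni
        exfalso
        have := hni 0 (by simp)
        simp at this
        omega
    exact pvFold_eq books ((books.length : Int) - 2).toNat 1 _ [0] [b0] b0 le_rfl (by omega)
      hdp0 hinv
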